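-- pv_equiv track=rewrite | github.com/brianlockwood43/epoxy-bot | bot.py | _format_memory_events_window
-- ===== SOURCE A (Python) =====
-- def _format_memory_events_window(rows: list[tuple[str, str, str, str]], max_chars: int = 12000) -> str:
--     if not rows:
--         return "(no memory events)"
--     rows = list(reversed(rows))  # chronological
--     out_lines = []
--     total = 0
--     for created_at_utc, author_name, channel_name, text in rows:
--         ts = created_at_utc
--         if ts and "T" in ts:
--             try:
--                 ts = ts.split("T", 1)[1][:5]
--             except Exception:
--                 pass
--         ch = channel_name or "unknown-channel"
--         who = author_name or "unknown-author"
--         clean = " ".join((text or "").split())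
--         line = f"[{ts}] {who} #{ch} :: {clean}"
--         if total + len(line) + 1 > max_chars:
--             break
--         out_lines.append(line)
--         total += len(line) + 1
--     return "\n".join(out_lines)
-- ===== SOURCE B (Python) =====
-- def _fmt_line(row):
--     created_at_utc, author_name, channel_name, text = row
--     ts = created_at_utc
--     if ts and "T" in ts:
--         ts = ts.split("T", 1)[1][:5]
--     ch = channel_name or "unknown-channel"
--     who = author_name or "unknown-author"
--     clean = " ".join((text or "").split())
--     return f"[{ts}] {who} #{ch} :: {clean}"
--
--
-- def _format_memory_events_window(rows: list, max_chars: int = 12000) -> str: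
--     if not rows:
--         return "(no memory events)"
--     lines = [_fmt_line(row) for row in reversed(rows)]
--     prefix = []
--     total = 0
--     for line in lines:
--         total += len(line) + 1
--         prefix.append(total)
--     # binary search: k = number of cumulative sizes <= max_chars
--     lo, hi = 0, len(prefix)
--     while lo < hi:
--         mid = (lo + hi) // 2
--         if prefix[mid] <= max_chars:
--             lo = mid + 1
--         else:
--             hi = mid
--     return "\n".join(lines[:lo])
-- ===== Notes on version B (the rewrite author's own statement) =====
-- stated objective: alternative
-- what changed: B replaces A's single running-total scan-with-break by a different decomposition: format all lines up front, build the list of prefix sums of (len(line)+1), and locate the cutoff count with a hand-written binary search over the monotone prefix sums rather than accumulating and breaking.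
import Mathlib
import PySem

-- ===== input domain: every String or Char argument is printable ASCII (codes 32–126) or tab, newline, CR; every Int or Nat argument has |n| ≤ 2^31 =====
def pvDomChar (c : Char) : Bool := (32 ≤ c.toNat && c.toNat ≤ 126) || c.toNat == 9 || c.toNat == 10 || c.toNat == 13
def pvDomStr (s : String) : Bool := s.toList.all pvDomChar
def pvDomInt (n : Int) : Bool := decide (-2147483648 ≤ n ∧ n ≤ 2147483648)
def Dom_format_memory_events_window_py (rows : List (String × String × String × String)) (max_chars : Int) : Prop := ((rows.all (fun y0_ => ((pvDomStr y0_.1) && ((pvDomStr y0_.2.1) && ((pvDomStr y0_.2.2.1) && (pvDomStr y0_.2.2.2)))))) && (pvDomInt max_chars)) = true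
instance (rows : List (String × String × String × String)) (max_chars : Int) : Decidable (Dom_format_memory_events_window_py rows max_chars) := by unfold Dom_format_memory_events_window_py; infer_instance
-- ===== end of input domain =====

-- ===== PORT A =====
-- B replaces A's running-total scan with precomputed lines + prefix sums + a hand-written
-- binary search for the cutoff (alternative decomposition; not claimed faster).

-- A: format each row and append while the running total (with '\n' separators) fits.
-- Python's dead `try/except` around split("T",1)[1][:5] is omitted: under the guard
-- '"T" in ts' the split always has a second part, so the except branch is unreachable.
def pvLoopA (max_chars : Int) : List (String × String × String × String) → List String → Int → List String
  | [], acc, _ => acc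
  | r :: rest, acc, total =>
      let ts0 := r.1
      let ts := if ts0 ≠ "" ∧ PySem.Str.isIn "T" ts0 = true then
          PySem.Str.slice (PySem.List.pyGetD ((PySem.Str.splitMax? ts0 "T" 1).getD []) 1 "") none (some 5)
        else ts0
      let who := if r.2.1 = "" then "unknown-author" else r.2.1
      let ch := if r.2.2.1 = "" then "unknown-channel" else r.2.2.1
      let clean := PySem.Str.join " " (PySem.Str.split₀ (if r.2.2.2 = "" then "" else r.2.2.2))
      let line := PySem.Str.join "" ["[", ts, "] ", who, " #", ch, " :: ", clean]
      if total + PySem.Str.len line + 1 > max_chars then acc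
      else pvLoopA max_chars rest (acc ++ [line]) (total + PySem.Str.len line + 1)

def format_memory_events_window_py (rows : List (String × String × String × String)) (max_chars : Int) : String :=
  if rows = [] then "(no memory events)"
  else PySem.Str.join "\n" (pvLoopA max_chars rows.reverse [] 0)

-- ===== PORT B =====
-- _fmt_line of Source B (same per-row formatting).
def pvFmtLine (r : String × String × String × String) : String :=
  let ts0 := r.1
  let ts := if ts0 ≠ "" ∧ PySem.Str.isIn "T" ts0 = true then
      PySem.Str.slice (PySem.List.pyGetD ((PySem.Str.splitMax? ts0 "T" 1).getD []) 1 "") none (some 5)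
    else ts0
  let who := if r.2.1 = "" then "unknown-author" else r.2.1
  let ch := if r.2.2.1 = "" then "unknown-channel" else r.2.2.1
  let clean := PySem.Str.join " " (PySem.Str.split₀ (if r.2.2.2 = "" then "" else r.2.2.2))
  PySem.Str.join "" ["[", ts, "] ", who, " #", ch, " :: ", clean]

-- Source B's prefix-sum loop (total += len(line)+1; prefix.append(total)).
def pvPrefixSums : List String → Int → List Int
  | [], _ => []
  | l :: ls, total =>
      let t := total + PySem.Str.len l + 1
      t :: pvPrefixSums ls t

-- Source B's `while lo < hi` binary search; lo, hi stay in 0..len(prefix) so Nat `(lo+hi)/2`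
-- is exactly Python's (lo+hi)//2 here.
def pvBisect (pfx : List Int) (x : Int) (lo hi : Nat) : Nat :=
  if h : lo < hi then
    let mid := (lo + hi) / 2
    if PySem.List.pyGetD pfx (mid : Int) 0 ≤ x then pvBisect pfx x (mid + 1) hi
    else pvBisect pfx x lo mid
  else lo
termination_by hi - lo
decreasing_by all_goals omega

def format_memory_events_window_py_alt (rows : List (String × String × String × String)) (max_chars : Int) : String :=
  if rows = [] then "(no memory events)"
  else
    let lines := rows.reverse.map pvFmtLine
    let pfx := pvPrefixSums lines 0
    let k := pvBisect pfx max_chars 0 pfx.length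
    PySem.Str.join "\n" (PySem.List.slice lines none (some (k : Int)))

-- ===== PRECONDITION & SPEC =====
def Spec_format_memory_events_window_py (rows : List (String × String × String × String)) (max_chars : Int) (out : String) : Prop := out = format_memory_events_window_py_alt rows max_chars
instance (rows : List (String × String × String × String)) (max_chars : Int) (out : String) : Decidable (Spec_format_memory_events_window_py rows max_chars out) := by unfold Spec_format_memory_events_window_py; infer_instance

-- ===== CLAIM (what is proved, stated in full; the proofs are below) =====
def Claim_equal_format_memory_events_window_py : Prop := ∀ (rows : List (String × String × String × String)) (max_chars : Int), Dom_format_memory_events_window_py rows max_chars → Spec_format_memory_events_window_py rows max_chars (format_memory_events_window_py rows max_chars)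

-- ===== LEMMAS AND PROOFS =====

-- A's loop keeps the longest prefix of the formatted lines whose cumulative size fits.
def pvTakeCum (M : Int) : List String → Int → List String
  | [], _ => []
  | l :: ls, total =>
      if total + PySem.Str.len l + 1 > M then []
      else l :: pvTakeCum M ls (total + PySem.Str.len l + 1)

theorem pvLoopA_eq (M : Int) (rs : List (String × String × String × String))
    (acc : List String) (total : Int) :
    pvLoopA M rs acc total = acc ++ pvTakeCum M (rs.map pvFmtLine) total := by
  induction rs generalizing acc total with
  | nil => simp [pvLoopA, pvTakeCum]
  | cons r rest ih =>
      -- pvLoopA's inline let-chain is definitionally pvFmtLine r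
      show (if total + PySem.Str.len (pvFmtLine r) + 1 > M then acc
            else pvLoopA M rest (acc ++ [pvFmtLine r]) (total + PySem.Str.len (pvFmtLine r) + 1))
          = acc ++ pvTakeCum M (pvFmtLine r :: rest.map pvFmtLine) total
      simp only [pvTakeCum]
      split
      · simp
      · rw [ih]; simp

theorem pvPrefixSums_length (ls : List String) (t : Int) :
    (pvPrefixSums ls t).length = ls.length := by
  induction ls generalizing t with
  | nil => simp [pvPrefixSums]
  | cons l ls ih => simp [pvPrefixSums, ih]

theorem pvPrefixSums_gt (ls : List String) (t : Int) :
    ∀ y ∈ pvPrefixSums ls t, t < y := by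
  induction ls generalizing t with
  | nil => simp [pvPrefixSums]
  | cons l ls ih =>
      intro y hy
      simp only [pvPrefixSums, List.mem_cons] at hy
      have hlen : 0 ≤ PySem.Str.len l := by simp [PySem.Str.len_eq]
      rcases hy with h | h
      · omega
      · have := ih _ _ h; omega

theorem pvPrefixSums_pairwise (ls : List String) (t : Int) :
    (pvPrefixSums ls t).Pairwise (· < ·) := by
  induction ls generalizing t with
  | nil => simp [pvPrefixSums]
  | cons l ls ih =>
      simp only [pvPrefixSums, List.pairwise_cons]
      exact ⟨fun y hy => pvPrefixSums_gt ls _ y hy, ih _⟩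

theorem pvTakeCum_eq_take (M : Int) (ls : List String) (t : Int) :
    pvTakeCum M ls t = ls.take ((pvPrefixSums ls t).countP (fun y => decide (y ≤ M))) := by
  induction ls generalizing t with
  | nil => simp [pvTakeCum, pvPrefixSums]
  | cons l ls ih =>
      simp only [pvTakeCum, pvPrefixSums, List.countP_cons]
      split
      · rename_i h
        simp only [PySem.Str.len_eq, String.length_toList] at h
        simp
        constructor
        · intro a ha
          have := pvPrefixSums_gt ls _ a ha
          omega
        · omega
      · rename_i h
        simp only [PySem.Str.len_eq, String.length_toList] at h
        simp [ih]
        have hc : t + (l.length : Int) < M := by omega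
        simp [hc, List.take_succ_cons]

theorem pvBisect_spec_aux (pfx : List Int) (x : Int)
    (hpw : pfx.Pairwise (· < ·)) :
    ∀ n lo hi, hi - lo ≤ n → lo ≤ hi → hi ≤ pfx.length →
    (∀ i, i < lo → ∀ h : i < pfx.length, pfx[i] ≤ x) →
    (∀ i, hi ≤ i → ∀ h : i < pfx.length, ¬ pfx[i] ≤ x) →
    lo ≤ pvBisect pfx x lo hi ∧ pvBisect pfx x lo hi ≤ hi ∧
      (∀ i, ∀ h : i < pfx.length, (pfx[i] ≤ x ↔ i < pvBisect pfx x lo hi)) := by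
  have hmono : ∀ i j (hi' : i < pfx.length) (hj : j < pfx.length),
      i < j → pfx[i] < pfx[j] :=
    fun i j hi' hj hij => List.pairwise_iff_getElem.mp hpw i j hi' hj hij
  intro n
  induction n with
  | zero =>
      intro lo hi hn hlohi hhile hlow hup
      have : lo = hi := by omega
      subst this
      rw [pvBisect]
      simp only [lt_irrefl, dite_false]
      refine ⟨le_refl _, le_refl _, fun i h => ⟨fun hle => ?_, fun hilt => hlow i hilt h⟩⟩
      by_contra hge
      exact hup i (by omega) h hle
  | succ n ih =>
      intro lo hi hn hlohi hhile hlow hup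
      rw [pvBisect]
      split
      · rename_i hlt
        have hmidlt : (lo + hi) / 2 < pfx.length := by omega
        dsimp only
        rw [PySem.List.pyGetD_natCast, List.getD_eq_getElem _ _ hmidlt]
        split
        · rename_i hle
          have hrec := ih ((lo + hi) / 2 + 1) hi (by omega) (by omega) hhile
            (fun i hilt h => by
              rcases Nat.lt_or_ge i ((lo + hi) / 2) with hc | hc
              · have := hmono i _ h hmidlt hc; omega
              · have : i = (lo + hi) / 2 := by omega
                subst this; exact hle)
            hup
          obtain ⟨h1, h2, h3⟩ := hrec
          exact ⟨by omega, h2, h3⟩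
        · rename_i hgt
          have hrec := ih lo ((lo + hi) / 2) (by omega) (by omega) (by omega)
            hlow
            (fun i hge h hcon => by
              rcases Nat.eq_or_lt_of_le hge with heq | hc
              · subst heq; exact hgt hcon
              · have := hmono _ i hmidlt h hc; omega)
          obtain ⟨h1, h2, h3⟩ := hrec
          exact ⟨h1, by omega, h3⟩
      · rename_i hnlt
        have : lo = hi := by omega
        subst this
        refine ⟨le_refl _, le_refl _, fun i h => ⟨fun hle => ?_, fun hilt => hlow i hilt h⟩⟩
        by_contra hge
        exact hup i (by omega) h hle

theorem countP_eq_cut (p : Int → Bool) (l : List Int) (c : Nat) (hc : c ≤ l.length)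
    (h : ∀ i, ∀ hi : i < l.length, (p l[i] = true ↔ i < c)) :
    l.countP p = c := by
  induction l generalizing c with
  | nil =>
      simp only [List.length_nil, Nat.le_zero] at hc
      simp [hc]
  | cons a tl ih =>
      cases c with
      | zero =>
          rw [List.countP_eq_zero.mpr]
          intro y hy
          obtain ⟨i, hi, rfl⟩ := List.mem_iff_getElem.mp hy
          intro hp
          exact absurd ((h i hi).mp hp) (by omega)
      | succ c' =>
          have hpa : p a = true := (h 0 (by simp)).mpr (by omega)
          have htl : tl.countP p = c' := ih c' (by simpa using hc) (fun i hi => by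
            have := h (i + 1) (by simpa using Nat.succ_lt_succ hi)
            simpa [Nat.succ_lt_succ_iff] using this)
          simp [hpa, htl]

-- ===== VERDICT (by name: the statement is the Claim_ definition above) =====
theorem format_memory_events_window_py_spec : Claim_equal_format_memory_events_window_py := by
  intro rows max_chars _
  unfold Spec_format_memory_events_window_py
  unfold format_memory_events_window_py format_memory_events_window_py_alt
  split
  · rfl
  · dsimp only
    rw [pvLoopA_eq, List.nil_append, pvTakeCum_eq_take]
    have hlen : (pvPrefixSums (rows.reverse.map pvFmtLine) 0).length
        = (rows.reverse.map pvFmtLine).length := pvPrefixSums_length _ _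
    obtain ⟨-, hle, hiff⟩ := pvBisect_spec_aux (pvPrefixSums (rows.reverse.map pvFmtLine) 0)
      max_chars (pvPrefixSums_pairwise _ _)
      ((pvPrefixSums (rows.reverse.map pvFmtLine) 0).length) 0
      ((pvPrefixSums (rows.reverse.map pvFmtLine) 0).length)
      (by omega) (Nat.zero_le _) (le_refl _)
      (fun i hi h => by omega) (fun i hge h => by omega)
    have hcount : (pvPrefixSums (rows.reverse.map pvFmtLine) 0).countP (fun y => decide (y ≤ max_chars))
        = pvBisect (pvPrefixSums (rows.reverse.map pvFmtLine) 0) max_chars 0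
            (pvPrefixSums (rows.reverse.map pvFmtLine) 0).length := by
      apply countP_eq_cut _ _ _ hle
      intro i hi
      simpa using hiff i hi
    rw [PySem.List.slice_to_natCast, hcount]
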